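-- pv_equiv track=rewrite | github.com/salonxix/Python_100-days-streak | cerate_components_with_same_value.py | maximumEdgesToDelete
-- ===== SOURCE A (Python) =====
-- from collections import defaultdict
--
-- def maximumEdgesToDelete(nums, edges):
--     n = len(nums)
--     graph = defaultdict(list)
--
--     for u, v in edges:
--         graph[u].append(v)
--         graph[v].append(u)
--
--     total = sum(nums)
--
--     for k in range(n, 0, -1):
--         if total % k != 0:
--             continue
--         target = total // k
--         count = [0]
--
--         def dfs(node, parent):
--             curr_sum = nums[node]
--             for nei in graph[node]:
--                 if nei != parent:
--                     curr_sum += dfs(nei, node)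
--             if curr_sum == target:
--                 count[0] += 1
--                 return 0  # We remove this edge
--             return curr_sum
--
--         dfs(0, -1)
--
--         if count[0] == k:
--             return k - 1  # We can make k parts by removing k-1 edges
--
--     return 0
-- ===== SOURCE B (Python) =====
-- from collections import defaultdict
--
-- def maximumEdgesToDelete(nums, edges):
--     # Iterative re-implementation: explicit frame stack instead of recursion.
--     n = len(nums)
--     graph = defaultdict(list)
--     for u, v in edges:
--         graph[u].append(v)
--         graph[v].append(u)
--     total = sum(nums)
--     for k in range(n, 0, -1):
--         if total % k != 0:
--             continue
--         target = total // k
--         count = 0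
--         # frame: [node, parent, accumulated sum, next-neighbour index]
--         stack = [[0, -1, nums[0], 0]]
--         while stack:
--             node, parent, acc, i = stack[-1]
--             kids = graph.get(node, [])
--             if i < len(kids):
--                 stack[-1][3] = i + 1
--                 nei = kids[i]
--                 if nei != parent:
--                     stack.append([nei, node, nums[nei], 0])
--             else:
--                 stack.pop()
--                 if acc == target:
--                     count += 1
--                     r = 0
--                 else:
--                     r = acc
--                 if stack:
--                     stack[-1][2] += r
--         if count == k:
--             return k - 1
--     return 0
-- ===== Notes on version B (the rewrite author's own statement) =====
-- stated objective: alternative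
-- what changed: A's recursive closure-based DFS (with a mutable one-cell count and per-target recursion) is replaced by an iterative post-order traversal using an explicit stack of frames (node, parent, accumulated sum, next-neighbour index), with count as a plain accumulator; the outer k-loop and greedy reset rule are kept identical.
import Mathlib
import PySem

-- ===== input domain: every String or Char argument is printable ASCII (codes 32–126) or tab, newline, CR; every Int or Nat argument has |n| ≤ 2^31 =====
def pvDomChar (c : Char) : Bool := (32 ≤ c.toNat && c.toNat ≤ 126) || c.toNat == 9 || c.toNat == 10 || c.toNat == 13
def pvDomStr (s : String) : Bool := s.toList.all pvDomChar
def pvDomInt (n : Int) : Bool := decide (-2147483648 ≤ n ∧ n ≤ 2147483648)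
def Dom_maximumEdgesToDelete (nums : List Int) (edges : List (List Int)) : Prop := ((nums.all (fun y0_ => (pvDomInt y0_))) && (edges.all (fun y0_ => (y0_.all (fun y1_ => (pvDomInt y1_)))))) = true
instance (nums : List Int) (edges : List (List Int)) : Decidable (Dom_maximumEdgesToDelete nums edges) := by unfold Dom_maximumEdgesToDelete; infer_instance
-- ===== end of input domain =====

-- B replaces A's recursive closure-based DFS by an iterative explicit-frame-stack traversal
-- (objective: alternative decomposition, same asymptotic cost; return value only, neither
-- program mutates its arguments).

-- ===== PORT A =====

-- Both Pythons build the adjacency dict with the identical four lines; shared helper.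
-- (A's defaultdict reads inside dfs insert an empty list, which is unobservable: lookups only.)
def pvAdj (edges : List (List Int)) : PySem.Dict Int (List Int) :=
  edges.foldl (fun g e =>
    match e with
    | [u, v] =>
        let g := g.insert u ((g.getD u []) ++ [v])
        g.insert v ((g.getD v []) ++ [u])
    | _ => g)  -- a row that is not a pair raises ValueError in Python: outside Pre_
    PySem.Dict.empty

-- Fuel for both ports (one unit per neighbour examined / per return); far larger than the
-- number of traversal steps of any input on which the Python terminates, and the equality of
-- the two ports is proved below for EVERY fuel value.
def pvGas (nums : List Int) (edges : List (List Int)) : Nat :=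
  (nums.length + 4) * 4 ^ (edges.length + 4)

-- A's recursive `dfs`, gas-instrumented; `count` (A's one-cell list) is threaded as `cnt`.
-- The recursive call `dfs(k, node)` is the d'+1 case below (the body of dfs is inlined at its
-- single call site so that the recursion is structural in (d, ks)); `d` bounds the recursion
-- depth for termination and never fires before the gas does, since gas ≤ d + 1 throughout.
-- Returns (curr_sum, count, remaining gas); none = fuel ran out (A raised: outside Pre_).
def dfsKidsA (adj : PySem.Dict Int (List Int)) (numsL : List Int) (target : Int) :
    Nat → Nat → List Int → Int → Int → Int → Int → Option (Int × Int × Nat)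
  | _, 0, _, _, _, _, _ => none
  | _, gas+1, [], _, _, s, cnt =>
      some (if s = target then (0, cnt + 1, gas) else (s, cnt, gas))
  | d, gas+1, k :: ks, node, parent, s, cnt =>
      if k ≠ parent then
        match d with
        | 0 => none
        | d'+1 =>
          match dfsKidsA adj numsL target d' gas (adj.getD k []) k node
              (PySem.List.pyGetD numsL k 0) cnt with
          | none => none
          | some (r, cnt', gas') =>
              dfsKidsA adj numsL target (d'+1) gas' ks node parent (s + r) cnt'
      else dfsKidsA adj numsL target d gas ks node parent s cnt
  termination_by d _ ks => (d, ks.length)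

-- A's `for k in range(n, 0, -1)` loop with its early return.
def pvLoopA (adj : PySem.Dict Int (List Int)) (numsL : List Int) (total : Int) (gas : Nat) :
    List Int → Int
  | [] => 0
  | k :: ks =>
    if PySem.Int.mod total k ≠ 0 then pvLoopA adj numsL total gas ks
    else
      let target := PySem.Int.floordiv total k
      match dfsKidsA adj numsL target gas gas (adj.getD 0 []) 0 (-1)
          (PySem.List.pyGetD numsL 0 0) 0 with
      | none => pvLoopA adj numsL total gas ks            -- fuel ran out: outside Pre_
      | some (_r, cnt, gas') =>
        if gas' = 0 then pvLoopA adj numsL total gas ks   -- fuel artifact, unreachable under Pre_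
        else if cnt = k then k - 1 else pvLoopA adj numsL total gas ks

def maximumEdgesToDelete (nums : List Int) (edges : List (List Int)) : Int :=
  let n : Int := nums.length
  let graph := pvAdj edges
  let total := nums.sum
  pvLoopA graph nums total (pvGas nums edges) (PySem.List.pyRange n 0 (-1))

-- ===== PORT B =====

-- B's while-loop: explicit stack of frames (node, parent, accumulated sum, next-kid index);
-- one gas unit per loop iteration. Returns the final `count`; none = fuel ran out
-- (B's Python loops forever there: outside Pre_).
def pvRun (adj : PySem.Dict Int (List Int)) (numsL : List Int) (target : Int) :
    Nat → List (Int × Int × Int × Nat) → Int → Option Int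
  | 0, _, _ => none
  | _+1, [], cnt => some cnt
  | gas+1, (node, parent, acc, i) :: S, cnt =>
      let kids := adj.getD node []
      if i < kids.length then
        let nei := kids.getD i 0
        if nei ≠ parent then
          pvRun adj numsL target gas
            ((nei, node, PySem.List.pyGetD numsL nei 0, 0) :: (node, parent, acc, i+1) :: S) cnt
        else pvRun adj numsL target gas ((node, parent, acc, i+1) :: S) cnt
      else
        let r := if acc = target then 0 else acc
        let cnt' := if acc = target then cnt + 1 else cnt
        match S with
        | [] => pvRun adj numsL target gas [] cnt'
        | (n2, p2, a2, j) :: S' => pvRun adj numsL target gas ((n2, p2, a2 + r, j) :: S') cnt'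

-- B's `for k in range(n, 0, -1)` loop.
def pvLoopB (adj : PySem.Dict Int (List Int)) (numsL : List Int) (total : Int) (gas : Nat) :
    List Int → Int
  | [] => 0
  | k :: ks =>
    if PySem.Int.mod total k ≠ 0 then pvLoopB adj numsL total gas ks
    else
      let target := PySem.Int.floordiv total k
      match pvRun adj numsL target gas [(0, -1, PySem.List.pyGetD numsL 0 0, 0)] 0 with
      | none => pvLoopB adj numsL total gas ks            -- fuel ran out: outside Pre_
      | some cnt => if cnt = k then k - 1 else pvLoopB adj numsL total gas ks

def maximumEdgesToDelete_alt (nums : List Int) (edges : List (List Int)) : Int :=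
  let n : Int := nums.length
  let graph := pvAdj edges
  let total := nums.sum
  pvLoopB graph nums total (pvGas nums edges) (PySem.List.pyRange n 0 (-1))

-- ===== PRECONDITION & SPEC =====

-- the edge rows that are pairs, as (u, v)
def pvPairs (edges : List (List Int)) : List (Int × Int) :=
  edges.filterMap (fun e => match e with | [u, v] => some (u, v) | _ => none)

-- The DFS visits the state (node, parent) pairs reachable from (0, -1) under
-- (v, p) → (w, v) for w adjacent to v, w ≠ p (a non-backtracking step); these helpers are
-- plain graph-theoretic conditions on the input edges (they compute no sums or counts).
def pvAdjLab (ps : List (Int × Int)) (v : Int) : List Int :=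
  ps.foldl (fun a p =>
    let a := if p.1 = v then a ++ [p.2] else a
    if p.2 = v then a ++ [p.1] else a) []

def pvSuccs (ps : List (Int × Int)) (s : Int × Int) : List (Int × Int) :=
  ((pvAdjLab ps s.1).filter (fun w => w ≠ s.2)).map (fun w => (w, s.1))

-- states reachable from (0, -1): iterated closure, enough passes to reach the fixpoint
def pvReach (edges : List (List Int)) : List (Int × Int) :=
  let ps := pvPairs edges
  (List.range (4 * edges.length + 2)).foldl
    (fun R _ => R.foldl (fun R s =>
      (pvSuccs ps s).foldl (fun R t => if t ∈ R then R else R ++ [t]) R) R)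
    [(0, -1)]

-- reachable states from which an infinite non-backtracking walk exists (repeatedly discard
-- states without a successor in the set); empty iff the traversal terminates
def pvLive (edges : List (List Int)) : List (Int × Int) :=
  let ps := pvPairs edges
  (List.range (4 * edges.length + 3)).foldl
    (fun L _ => L.filter (fun s => (pvSuccs ps s).any (fun t => t ∈ L)))
    (pvReach edges)

-- Pre_ = exactly the inputs on which Python A returns normally: every edge row is a pair
-- (else ValueError while unpacking), and — when nums is nonempty, so the k-loop runs a DFS
-- from node 0 — every vertex the traversal visits is a valid (possibly negative,
-- Python-style) index into nums (else IndexError), and no infinite non-backtracking walk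
-- starts at (0, -1) (else the recursion never terminates and A raises RecursionError).
def Pre_maximumEdgesToDelete (nums : List Int) (edges : List (List Int)) : Prop :=
  (∀ e ∈ edges, e.length = 2) ∧
  (nums ≠ [] →
    (∀ s ∈ pvReach edges, -(nums.length : Int) ≤ s.1 ∧ s.1 < (nums.length : Int)) ∧
    pvLive edges = [])

instance (nums : List Int) (edges : List (List Int)) : Decidable (Pre_maximumEdgesToDelete nums edges) := by
  unfold Pre_maximumEdgesToDelete; infer_instance

def pvWitness_maximumEdgesToDelete : List Int × List (List Int) :=
  ([1, 2, 1, 2], [[0, 1], [1, 2], [2, 3]])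

def Spec_maximumEdgesToDelete (nums : List Int) (edges : List (List Int)) (out : Int) : Prop := out = maximumEdgesToDelete_alt nums edges
instance (nums : List Int) (edges : List (List Int)) (out : Int) : Decidable (Spec_maximumEdgesToDelete nums edges out) := by unfold Spec_maximumEdgesToDelete; infer_instance

-- ===== CLAIM (what is proved, stated in full; the proofs are below) =====
def Claim_equal_maximumEdgesToDelete : Prop := ∀ (nums : List Int) (edges : List (List Int)), Dom_maximumEdgesToDelete nums edges → Pre_maximumEdgesToDelete nums edges → Spec_maximumEdgesToDelete nums edges (maximumEdgesToDelete nums edges)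

-- ===== LEMMAS AND PROOFS =====
-- The two ports are proved equal for EVERY fuel value (the fuel is consumed at exactly the
-- same events on both sides), so the proof needs no graph-theoretic precondition at all.

-- the gas returned by a completed dfs is strictly smaller than the gas it started with
theorem dfsKidsA_gas_lt (adj : PySem.Dict Int (List Int)) (numsL : List Int) (target : Int) :
    ∀ (d gas : Nat) (ks : List Int) (node parent s cnt : Int) (r cnt' : Int) (gas' : Nat),
      dfsKidsA adj numsL target d gas ks node parent s cnt = some (r, cnt', gas') → gas' < gas := by
  intro d gas ks node parent s cnt
  induction d, gas, ks, node, parent, s, cnt using dfsKidsA.induct adj numsL target with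
  | case1 x x1 x2 x3 x4 x5 =>
    intro r cnt' gas' h; simp [dfsKidsA] at h
  | case2 x gas x1 x2 s cnt =>
    intro r cnt' gas' h
    simp only [dfsKidsA] at h
    split at h <;> simp_all
  | case3 gas k ks node parent s cnt hne =>
    intro r cnt' gas' h
    rw [dfsKidsA, if_pos hne] at h
    exact absurd h (by simp)
  | case4 gas k ks node parent s cnt hne d' hchild ih =>
    intro r cnt' gas' h
    rw [dfsKidsA, if_pos hne] at h
    rw [hchild] at h
    exact absurd h (by simp)
  | case5 gas k ks node parent s cnt hne d' r0 c0 g0 hchild ih1 ih2 =>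
    intro r cnt' gas' h
    rw [dfsKidsA, if_pos hne, hchild] at h
    have h1 := ih1 r0 c0 g0 hchild
    have h2 := ih2 r cnt' gas' h
    omega
  | case6 d gas k ks node parent s cnt hne ih =>
    intro r cnt' gas' h
    rw [dfsKidsA.eq_def] at h
    simp only [if_neg hne] at h
    have := ih r cnt' gas' h
    omega

-- unfolding equations for dfsKidsA on a cons, with the inner matches reduced
theorem dfsKidsA_cons_ne (adj : PySem.Dict Int (List Int)) (numsL : List Int) (target : Int)
    (d' gas : Nat) (k : Int) (ks : List Int) (node parent s cnt : Int) (hne : k ≠ parent) :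
    dfsKidsA adj numsL target (d' + 1) (gas + 1) (k :: ks) node parent s cnt
      = match dfsKidsA adj numsL target d' gas (adj.getD k []) k node
            (PySem.List.pyGetD numsL k 0) cnt with
        | none => none
        | some (r, cnt', gas') =>
            dfsKidsA adj numsL target (d' + 1) gas' ks node parent (s + r) cnt' := by
  rw [dfsKidsA]
  simp [if_pos hne]

theorem dfsKidsA_zero_cons_ne (adj : PySem.Dict Int (List Int)) (numsL : List Int) (target : Int)
    (gas : Nat) (k : Int) (ks : List Int) (node parent s cnt : Int) (hne : k ≠ parent) :
    dfsKidsA adj numsL target 0 (gas + 1) (k :: ks) node parent s cnt = none := by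
  rw [dfsKidsA]
  simp [if_pos hne]

theorem dfsKidsA_cons_eq (adj : PySem.Dict Int (List Int)) (numsL : List Int) (target : Int)
    (d gas : Nat) (k : Int) (ks : List Int) (node parent s cnt : Int) (hne : ¬ k ≠ parent) :
    dfsKidsA adj numsL target d (gas + 1) (k :: ks) node parent s cnt
      = dfsKidsA adj numsL target d gas ks node parent s cnt := by
  rw [dfsKidsA.eq_def]
  simp [if_neg hne]

-- the pop step adds the returned value to the accumulator of the frame below (if any)
def pvBump : List (Int × Int × Int × Nat) → Int → List (Int × Int × Int × Nat)
  | [], _ => []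
  | (n2, p2, a2, j) :: S', r => (n2, p2, a2 + r, j) :: S'

-- MAIN LEMMA: the machine running the top frame from kid index i = the recursion over the
-- remaining kids followed by the pop, for every gas (the two sides consume gas identically).
theorem run_eq_dfs (adj : PySem.Dict Int (List Int)) (numsL : List Int) (target : Int) :
    ∀ (gas d : Nat) (node parent s : Int) (i : Nat) (cnt : Int)
      (S : List (Int × Int × Int × Nat)), gas ≤ d + 1 →
      pvRun adj numsL target gas ((node, parent, s, i) :: S) cnt
        = match dfsKidsA adj numsL target d gas ((adj.getD node []).drop i) node parent s cnt with
          | none => none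
          | some (r, cnt', gas') => pvRun adj numsL target gas' (pvBump S r) cnt' := by
  intro gas
  induction gas using Nat.strong_induction_on with
  | _ gas IH =>
    intro d node parent s i cnt S hle
    rcases gas with _ | gas
    · simp [pvRun, dfsKidsA]
    · by_cases hi : i < (adj.getD node []).length
      · -- machine examines neighbour kids[i]
        have hdrop : (adj.getD node []).drop i
            = (adj.getD node [])[i] :: (adj.getD node []).drop (i + 1) :=
          List.drop_eq_getElem_cons hi
        have hgetD : (adj.getD node []).getD i 0 = (adj.getD node [])[i] :=
          List.getD_eq_getElem _ _ hi
        rw [pvRun, if_pos hi, hgetD, hdrop]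
        by_cases hne : (adj.getD node [])[i] ≠ parent
        · rw [if_pos hne]
          rcases d with _ | d'
          · -- depth fuel exhausted: gas must be 0 too
            have : gas = 0 := by omega
            subst this
            rw [dfsKidsA_zero_cons_ne adj numsL target _ _ _ _ _ _ _ hne]
            simp [pvRun]
          · rw [dfsKidsA_cons_ne adj numsL target _ _ _ _ _ _ _ _ hne]
            have h1 := IH gas (by omega) d' (adj.getD node [])[i] node
              (PySem.List.pyGetD numsL (adj.getD node [])[i] 0) 0 cnt
              ((node, parent, s, i + 1) :: S) (by omega)
            rw [List.drop_zero] at h1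
            rw [h1]
            cases hchild : dfsKidsA adj numsL target d' gas (adj.getD (adj.getD node [])[i] [])
                (adj.getD node [])[i] node (PySem.List.pyGetD numsL (adj.getD node [])[i] 0) cnt with
            | none => simp
            | some v =>
              obtain ⟨r, c1, g1⟩ := v
              have hlt := dfsKidsA_gas_lt adj numsL target _ _ _ _ _ _ _ _ _ _ hchild
              have h2 := IH g1 (by omega) (d' + 1) node parent (s + r) (i + 1) c1 S (by omega)
              simp only [pvBump] at h2 ⊢
              rw [h2]
        · rw [if_neg hne]
          rw [dfsKidsA_cons_eq adj numsL target _ _ _ _ _ _ _ _ hne]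
          have h2 := IH gas (by omega) d node parent s (i + 1) cnt S (by omega)
          rw [h2]
      · -- all neighbours done: the pop step
        have hdrop : (adj.getD node []).drop i = [] :=
          List.drop_eq_nil_of_le (by omega)
        rw [pvRun, if_neg hi, hdrop, dfsKidsA]
        by_cases ht : s = target
        · simp only [if_pos ht]
          cases S with
          | nil => simp [pvBump]
          | cons f S' => obtain ⟨n2, p2, a2, j⟩ := f; simp [pvBump]
        · simp only [if_neg ht]
          cases S with
          | nil => simp [pvBump]
          | cons f S' => obtain ⟨n2, p2, a2, j⟩ := f; simp [pvBump]

-- after the final pop the machine consumes one more unit to leave the while loop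
theorem pvRun_nil (adj : PySem.Dict Int (List Int)) (numsL : List Int) (target : Int)
    (gas : Nat) (cnt : Int) :
    pvRun adj numsL target gas [] cnt = if gas = 0 then none else some cnt := by
  cases gas <;> simp [pvRun]

theorem loops_eq (adj : PySem.Dict Int (List Int)) (numsL : List Int) (total : Int) (gas : Nat) :
    ∀ ks : List Int, pvLoopA adj numsL total gas ks = pvLoopB adj numsL total gas ks := by
  intro ks
  induction ks with
  | nil => simp [pvLoopA, pvLoopB]
  | cons k ks ih =>
    rw [pvLoopA, pvLoopB]
    by_cases hm : PySem.Int.mod total k ≠ 0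
    · rw [if_pos hm, if_pos hm, ih]
    · rw [if_neg hm, if_neg hm]
      show (match dfsKidsA adj numsL (PySem.Int.floordiv total k) gas gas (adj.getD 0 [])
              0 (-1) (PySem.List.pyGetD numsL 0 0) 0 with
            | none => pvLoopA adj numsL total gas ks
            | some (_r, cnt, gas') =>
              if gas' = 0 then pvLoopA adj numsL total gas ks
              else if cnt = k then k - 1 else pvLoopA adj numsL total gas ks)
          = match pvRun adj numsL (PySem.Int.floordiv total k) gas
                [(0, -1, PySem.List.pyGetD numsL 0 0, 0)] 0 with
            | none => pvLoopB adj numsL total gas ks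
            | some cnt => if cnt = k then k - 1 else pvLoopB adj numsL total gas ks
      have hrun := run_eq_dfs adj numsL (PySem.Int.floordiv total k) gas gas 0 (-1)
        (PySem.List.pyGetD numsL 0 0) 0 0 [] (by omega)
      rw [List.drop_zero] at hrun
      rw [hrun]
      cases h : dfsKidsA adj numsL (PySem.Int.floordiv total k) gas gas (adj.getD 0 []) 0 (-1)
          (PySem.List.pyGetD numsL 0 0) 0 with
      | none => exact ih
      | some v =>
        obtain ⟨r, cnt, gas'⟩ := v
        simp only [pvBump, pvRun_nil]
        by_cases hg : gas' = 0
        · rw [if_pos hg, if_pos hg]; exact ih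
        · rw [if_neg hg]
          by_cases hc : cnt = k
          · simp [hc, hg]
          · simp [hc, hg, ih]

theorem ports_eq (nums : List Int) (edges : List (List Int)) :
    maximumEdgesToDelete nums edges = maximumEdgesToDelete_alt nums edges := by
  unfold maximumEdgesToDelete maximumEdgesToDelete_alt
  exact loops_eq _ _ _ _ _

-- ===== VERDICT (by name: the statement is the Claim_ definition above) =====
theorem maximumEdgesToDelete_spec : Claim_equal_maximumEdgesToDelete := by
  intro nums edges _dom _pre
  unfold Spec_maximumEdgesToDelete
  exact ports_eq nums edges
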